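-- pv_equiv track=rewrite | github.com/borntohonk/Switch-Ghidra-Guides | scripts/generate_pattern_diffs.py | add_markers_to_hex_pattern
-- ===== SOURCE A (Python) =====
-- def add_markers_to_hex_pattern(hex_pattern: str, marker_position: int) -> str:
--     """
--     Mark 4 bytes (8 hex chars) at a fixed byte position in the pattern.
--     Output format: "A0 A2 04 91 F9 74 00" with markers around the marked section.
--     """
--     try:
--         pattern_bytes = bytes.fromhex(hex_pattern)
--     except ValueError:
--         return hex_pattern
--
--     # Convert byte position to hex character position
--     hex_pos = marker_position * 2
--     marker_start = hex_pos
--     marker_end = min(len(hex_pattern), hex_pos + 8)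
--
--     if marker_start >= len(hex_pattern):
--         # If position is beyond string, adjust to mark last 4 bytes
--         marker_start = max(0, len(hex_pattern) - 8)
--         marker_end = len(hex_pattern)
--
--     before = hex_pattern[:marker_start]
--     marked = hex_pattern[marker_start:marker_end]
--     after = hex_pattern[marker_end:]
--
--     # Convert to space-separated format
--     def hex_to_spaced(h):
--         return ' '.join(h[i:i+2] for i in range(0, len(h), 2))
--
--     before_spaced = hex_to_spaced(before)
--     marked_spaced = hex_to_spaced(marked)
--     after_spaced = hex_to_spaced(after)
--
--     # Build result with appropriate spacing
--     if before_spaced and marked_spaced and after_spaced: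
--         return f"{before_spaced} -> {marked_spaced} <- {after_spaced}"
--     elif before_spaced and marked_spaced:
--         return f"{before_spaced} -> {marked_spaced} <-"
--     elif marked_spaced and after_spaced:
--         return f"-> {marked_spaced} <- {after_spaced}"
--     else:
--         return f"-> {marked_spaced} <-"
-- ===== SOURCE B (Python) =====
-- def add_markers_to_hex_pattern(hex_pattern: str, marker_position: int) -> str:
--     """Mark 4 bytes in a hex pattern, rendered as space-separated byte tokens."""
--     try:
--         bytes.fromhex(hex_pattern)
--     except ValueError:
--         return hex_pattern
--     tokens = [hex_pattern[i:i + 2] for i in range(0, len(hex_pattern), 2)]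
--     n = len(tokens)
--     start = marker_position if marker_position < n else max(0, n - 4)
--     end = min(n, start + 4)
--     tokens.insert(end, '<-')
--     tokens.insert(start, '->')
--     return ' '.join(tokens)
-- ===== Notes on version B (the rewrite author's own statement) =====
-- stated objective: simpler
-- what changed: B keeps the bytes.fromhex validation but replaces A's three substring slices, per-slice re-spacing helper and four-way spacing branch by one token list (byte pairs) into which the two markers are inserted by list.insert at indices computed directly in byte units, followed by a single join; …
-- intended difference: On the empty pattern A returns '-> <-' with a doubled space (the empty marked field of its f-string); B returns '-> <-', the intended rendering of an empty marked section. — e.g. on add_markers_to_hex_pattern("", 0): A returns "-> <-", B returns "-> <-"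
-- outside the precondition, e.g. on add_markers_to_hex_pattern('00112233', -1): A returns '->  <-', B returns '00 11 22 <- -> 33'; on add_markers_to_hex_pattern('420065 0b', 8): A returns '4 -> 20 06 5  0b <-', B returns '42 -> 00 65  0 b <-'
import Mathlib
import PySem

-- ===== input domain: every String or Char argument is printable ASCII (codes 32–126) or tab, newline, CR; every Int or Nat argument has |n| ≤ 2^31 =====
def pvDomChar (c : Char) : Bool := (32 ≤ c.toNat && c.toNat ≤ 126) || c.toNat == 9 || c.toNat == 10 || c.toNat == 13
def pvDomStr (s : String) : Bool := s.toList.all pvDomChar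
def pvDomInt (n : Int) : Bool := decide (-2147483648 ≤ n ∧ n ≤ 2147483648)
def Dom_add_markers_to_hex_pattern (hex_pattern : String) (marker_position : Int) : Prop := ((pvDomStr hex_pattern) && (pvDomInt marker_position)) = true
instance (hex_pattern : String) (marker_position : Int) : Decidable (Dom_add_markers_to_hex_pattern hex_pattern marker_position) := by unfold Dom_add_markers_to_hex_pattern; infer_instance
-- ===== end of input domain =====

-- B replaces A's three re-spaced substring slices and four-way branch by list.insert of the two
-- markers into one byte-token list, computed in byte units, and a single join (objective: simpler).

-- ===== PORT A =====
-- characters bytes.fromhex treats as skippable whitespace / as hex digits (CPython 3.11)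
def pvWsChars : List Char := [' ', '\t', '\n', '\x0b', '\x0c', '\r']
def pvHexChars : List Char := ['0','1','2','3','4','5','6','7','8','9','a','b','c','d','e','f','A','B','C','D','E','F']

-- hand port (exact): acceptance of bytes.fromhex — ASCII whitespace skipped, otherwise pairs of
-- adjacent hex digits; a ValueError in Python is `false` here (the function then returns the input)
def pvFromhexOk : List Char → Bool
  | [] => true
  | c :: t =>
    if pvWsChars.contains c then pvFromhexOk t
    else match t with
      | [] => false
      | d :: r => pvHexChars.contains c && pvHexChars.contains d && pvFromhexOk r

-- ' '.join(h[i:i+2] for i in range(0, len(h), 2))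
def pvHexToSpaced (h : List Char) : List Char :=
  PySem.Chars.join [' ']
    ((PySem.List.pyRange 0 (h.length : Int) 2).map (fun i => PySem.List.slice h (some i) (some (i + 2))))

def add_markers_to_hex_pattern (hex_pattern : String) (marker_position : Int) : String :=
  let s := hex_pattern.toList  -- the same character positions Python slices
  if pvFromhexOk s = false then hex_pattern
  else
    let n : Int := (s.length : Int)
    let hex_pos := marker_position * 2
    let marker_start := hex_pos
    let marker_end := min n (hex_pos + 8)
    let marker_start' := if marker_start ≥ n then max 0 (n - 8) else marker_start
    let marker_end' := if marker_start ≥ n then n else marker_end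
    let before := PySem.List.slice s none (some marker_start')
    let marked := PySem.List.slice s (some marker_start') (some marker_end')
    let after := PySem.List.slice s (some marker_end') none
    let before_spaced := pvHexToSpaced before
    let marked_spaced := pvHexToSpaced marked
    let after_spaced := pvHexToSpaced after
    if !before_spaced.isEmpty && !marked_spaced.isEmpty && !after_spaced.isEmpty then
      String.ofList (before_spaced ++ [' ', '-', '>', ' '] ++ marked_spaced ++ [' ', '<', '-', ' '] ++ after_spaced)
    else if !before_spaced.isEmpty && !marked_spaced.isEmpty then
      String.ofList (before_spaced ++ [' ', '-', '>', ' '] ++ marked_spaced ++ [' ', '<', '-'])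
    else if !marked_spaced.isEmpty && !after_spaced.isEmpty then
      String.ofList (['-', '>', ' '] ++ marked_spaced ++ [' ', '<', '-', ' '] ++ after_spaced)
    else
      String.ofList (['-', '>', ' '] ++ marked_spaced ++ [' ', '<', '-'])

-- ===== PORT B =====
-- Source B: validate with bytes.fromhex (same acceptance helper as A's port — both Pythons call the
-- same built-in), tokenize once, compute the window in byte units, insert the two markers, join once
def add_markers_to_hex_pattern_alt (hex_pattern : String) (marker_position : Int) : String :=
  let s := hex_pattern.toList
  if pvFromhexOk s = false then hex_pattern
  else
    let tokens := (PySem.List.pyRange 0 (s.length : Int) 2).map (fun i => PySem.List.slice s (some i) (some (i + 2)))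
    let n : Int := (tokens.length : Int)
    let start := if marker_position < n then marker_position else max 0 (n - 4)
    let stop := min n (start + 4)
    let tokens2 := PySem.List.insert tokens stop ['<', '-']
    let tokens3 := PySem.List.insert tokens2 start ['-', '>']
    String.ofList (PySem.Chars.join [' '] tokens3)

-- ===== PRECONDITION & SPEC =====
-- Pre_ excludes, among the patterns bytes.fromhex accepts, negative marker positions (a byte
-- offset outside the natural domain; A's values there arise from Python's negative-slice
-- wraparound) and odd-length accepted strings (whitespace between hex digits) longer than 8
-- characters whose position triggers A's last-4-bytes fallback, where that fallback starts the
-- window mid-token and any pair grouping is accidental.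
def Pre_add_markers_to_hex_pattern (hex_pattern : String) (marker_position : Int) : Prop :=
  ¬(pvFromhexOk hex_pattern.toList = true ∧
    (marker_position < 0 ∨
      (hex_pattern.toList.length % 2 = 1 ∧ 8 < hex_pattern.toList.length ∧
        (hex_pattern.toList.length : Int) ≤ marker_position * 2)))
instance (hex_pattern : String) (marker_position : Int) : Decidable (Pre_add_markers_to_hex_pattern hex_pattern marker_position) := by unfold Pre_add_markers_to_hex_pattern; infer_instance

def pvWitness_add_markers_to_hex_pattern : String × Int := ("a0a2", 0)

-- On the empty pattern A returns "->  <-" with a doubled space (the empty marked field of its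
-- f-string); B returns "-> <-", the intended rendering of an empty marked section.
def D_add_markers_to_hex_pattern (hex_pattern : String) (marker_position : Int) : Prop :=
  hex_pattern = ""
instance (hex_pattern : String) (marker_position : Int) : Decidable (D_add_markers_to_hex_pattern hex_pattern marker_position) := by unfold D_add_markers_to_hex_pattern; infer_instance

def Spec_add_markers_to_hex_pattern (hex_pattern : String) (marker_position : Int) (out : String) : Prop :=
  ¬ D_add_markers_to_hex_pattern hex_pattern marker_position → out = add_markers_to_hex_pattern_alt hex_pattern marker_position
instance (hex_pattern : String) (marker_position : Int) (out : String) : Decidable (Spec_add_markers_to_hex_pattern hex_pattern marker_position out) := by unfold Spec_add_markers_to_hex_pattern; infer_instance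

def pvDiffWitness_add_markers_to_hex_pattern : String × Int := ("", 0)
def pvDiffWitnessOut_add_markers_to_hex_pattern : String × String := ("->  <-", "-> <-")

-- ===== CLAIM (what is proved, stated in full; the proofs are below) =====
def Claim_unchanged_add_markers_to_hex_pattern : Prop := ∀ (hex_pattern : String) (marker_position : Int), Dom_add_markers_to_hex_pattern hex_pattern marker_position → Pre_add_markers_to_hex_pattern hex_pattern marker_position → Spec_add_markers_to_hex_pattern hex_pattern marker_position (add_markers_to_hex_pattern hex_pattern marker_position)
def Claim_changed_add_markers_to_hex_pattern : Prop := Dom_add_markers_to_hex_pattern (pvDiffWitness_add_markers_to_hex_pattern.1) (pvDiffWitness_add_markers_to_hex_pattern.2) ∧ Pre_add_markers_to_hex_pattern (pvDiffWitness_add_markers_to_hex_pattern.1) (pvDiffWitness_add_markers_to_hex_pattern.2) ∧ D_add_markers_to_hex_pattern (pvDiffWitness_add_markers_to_hex_pattern.1) (pvDiffWitness_add_markers_to_hex_pattern.2) ∧ add_markers_to_hex_pattern (pvDiffWitness_add_markers_to_hex_pattern.1) (pvDiffWitness_add_markers_to_hex_pattern.2) = pvDiffWitnessOut_add_markers_to_hex_pattern.1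 ∧ add_markers_to_hex_pattern_alt (pvDiffWitness_add_markers_to_hex_pattern.1) (pvDiffWitness_add_markers_to_hex_pattern.2) = pvDiffWitnessOut_add_markers_to_hex_pattern.2 ∧ pvDiffWitnessOut_add_markers_to_hex_pattern.1 ≠ pvDiffWitnessOut_add_markers_to_hex_pattern.2
def Claim_exact_add_markers_to_hex_pattern : Prop := ∀ (hex_pattern : String) (marker_position : Int), Dom_add_markers_to_hex_pattern hex_pattern marker_position → Pre_add_markers_to_hex_pattern hex_pattern marker_position → D_add_markers_to_hex_pattern hex_pattern marker_position → add_markers_to_hex_pattern hex_pattern marker_position ≠ add_markers_to_hex_pattern_alt hex_pattern marker_position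

-- ===== LEMMAS AND PROOFS =====
def chunk2 : List Char → List (List Char)
  | [] => []
  | [c] => [[c]]
  | c :: d :: r => [c, d] :: chunk2 r

theorem chunk2_eq_map (s : List Char) :
    chunk2 s = (List.range ((s.length + 1) / 2)).map (fun k => (s.drop (2 * k)).take 2) := by
  induction s using chunk2.induct with
  | case1 => simp [chunk2]
  | case2 c => simp [chunk2]
  | case3 c d r ih =>
    have h2 : ((c :: d :: r).length + 1) / 2 = (r.length + 1) / 2 + 1 := by
      simp only [List.length_cons]; omega
    rw [chunk2, h2, List.range_succ_eq_map, List.map_cons, List.map_map]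
    refine congrArg₂ _ (by simp) ?_
    rw [ih]
    refine List.map_congr_left ?_
    intro k hk
    simp [Nat.mul_succ]

theorem length_chunk2 (s : List Char) : (chunk2 s).length = (s.length + 1) / 2 := by
  rw [chunk2_eq_map]; simp

theorem chunk2_take (k : Nat) : ∀ s : List Char, chunk2 (s.take (2 * k)) = (chunk2 s).take k := by
  induction k with
  | zero => intro s; simp [chunk2]
  | succ k ih =>
    intro s
    match s with
    | [] => simp [chunk2]
    | [c] => simp [chunk2, Nat.mul_succ]
    | c :: d :: r =>
      rw [show 2 * (k + 1) = (2 * k + 1) + 1 by omega]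
      simp only [List.take_succ_cons]
      rw [chunk2, chunk2, List.take_succ_cons, ih]

theorem chunk2_drop (k : Nat) : ∀ s : List Char, chunk2 (s.drop (2 * k)) = (chunk2 s).drop k := by
  induction k with
  | zero => intro s; simp
  | succ k ih =>
    intro s
    match s with
    | [] => simp [chunk2]
    | [c] => simp [chunk2, Nat.mul_succ]
    | c :: d :: r =>
      rw [show 2 * (k + 1) = (2 * k + 1) + 1 by omega]
      simp only [List.drop_succ_cons]
      rw [chunk2, List.drop_succ_cons, ih]

theorem chunk2_ne_nil (s : List Char) : ∀ x ∈ chunk2 s, x ≠ [] := by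
  induction s using chunk2.induct with
  | case1 => simp [chunk2]
  | case2 c => simp [chunk2]
  | case3 c d r ih => simpa [chunk2] using ih

theorem join_sp_eq_nil (cs : List (List Char)) (h : ∀ x ∈ cs, x ≠ []) :
    PySem.Chars.join [' '] cs = [] ↔ cs = [] := by
  match cs with
  | [] => simp [PySem.Chars.join_nil]
  | [p] =>
    rw [PySem.Chars.join_singleton]
    simp [h p (by simp)]
  | p :: q :: r =>
    rw [PySem.Chars.join_cons_cons]
    simp only [List.append_eq_nil_iff]
    simp [h p (by simp)]

theorem join_append (sep : List Char) : ∀ (X ys : List (List Char)), ys ≠ [] →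
    PySem.Chars.join sep (X ++ ys) =
      (if X = [] then PySem.Chars.join sep ys
       else PySem.Chars.join sep X ++ sep ++ PySem.Chars.join sep ys) := by
  intro X
  induction X with
  | nil => intro ys hys; simp
  | cons x X ih =>
    intro ys hys
    match X with
    | [] =>
      match ys with
      | y :: ys' =>
        simp only [List.nil_append, List.cons_append]
        rw [PySem.Chars.join_cons_cons]
        simp [PySem.Chars.join_singleton]
    | x2 :: X' =>
      rw [List.cons_append, List.cons_append, PySem.Chars.join_cons_cons, ← List.cons_append,
        ih ys hys, if_neg (by simp), PySem.Chars.join_cons_cons]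
      simp [List.append_assoc]

theorem join_cons' (sep : List Char) (p : List Char) (rest : List (List Char)) (h : rest ≠ []) :
    PySem.Chars.join sep (p :: rest) = p ++ sep ++ PySem.Chars.join sep rest := by
  have := join_append sep [p] rest h
  simpa [PySem.Chars.join_singleton] using this

theorem pyRange_two (n : Nat) :
    PySem.List.pyRange 0 (n : Int) 2 = (List.range ((n + 1) / 2)).map (fun k : Nat => 2 * (k : Int)) := by
  rw [PySem.List.pyRange_of_pos 0 (n : Int) (by norm_num)]
  rcases Nat.eq_zero_or_pos n with h | h
  · subst h; simp
  · rw [if_pos (by exact_mod_cast h)]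
    have h1 : ((n : Int) - 0 + 2 - 1) = ((n + 1 : Nat) : Int) := by push_cast; ring
    rw [h1, show (2 : Int) = ((2 : Nat) : Int) from rfl, ← Int.natCast_div, Int.toNat_natCast]
    simp only [zero_add]

theorem tok_eq_chunk2 (s : List Char) :
    (PySem.List.pyRange 0 (s.length : Int) 2).map (fun i => PySem.List.slice s (some i) (some (i + 2))) = chunk2 s := by
  rw [pyRange_two, List.map_map, chunk2_eq_map]
  refine List.map_congr_left ?_
  intro k hk
  simp only [Function.comp_apply]
  rw [PySem.List.slice_toNat s (by positivity) (by positivity)]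
  have h1 : ((2 * (k : Int) + 2)).toNat = 2 * k + 2 := by omega
  have h2 : ((2 * (k : Int))).toNat = 2 * k := by omega
  rw [h1, h2]
  norm_num

-- two marker insertions at byte indices s ≤ e unfold to the take/drop decomposition
theorem insert_insert {α : Type} (T : List α) (s e : Nat) (hse : s ≤ e) (he : e ≤ T.length)
    (x y : α) :
    PySem.List.insert (PySem.List.insert T (e : Int) x) (s : Int) y =
      T.take s ++ [y] ++ (T.drop s).take (e - s) ++ [x] ++ T.drop e := by
  rw [PySem.List.insert_natCast T e x he,
    PySem.List.insert_natCast _ s y (by simp; omega)]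
  have htake : (T.take e ++ x :: T.drop e).take s = T.take s := by
    rw [List.take_append_of_le_length (by simp; omega), List.take_take,
      Nat.min_eq_left hse]
  have hdrop : (T.take e ++ x :: T.drop e).drop s = (T.drop s).take (e - s) ++ x :: T.drop e := by
    rw [List.drop_append_of_le_length (by simp; omega), List.drop_take]
  rw [htake, hdrop]; simp

theorem core_main (s : List Char) (a b sa sb : Nat) (ha : a = 2 * sa)
    (hb : b = 2 * sb ∨ (b = s.length ∧ sb = (s.length + 1) / 2))
    (hab : a < b) (hbL : b ≤ s.length) :
    (if !(pvHexToSpaced (s.take a)).isEmpty && !(pvHexToSpaced ((s.drop a).take (b - a))).isEmpty && !(pvHexToSpaced (s.drop b)).isEmpty then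
       pvHexToSpaced (s.take a) ++ [' ', '-', '>', ' '] ++ pvHexToSpaced ((s.drop a).take (b - a)) ++ [' ', '<', '-', ' '] ++ pvHexToSpaced (s.drop b)
     else if !(pvHexToSpaced (s.take a)).isEmpty && !(pvHexToSpaced ((s.drop a).take (b - a))).isEmpty then
       pvHexToSpaced (s.take a) ++ [' ', '-', '>', ' '] ++ pvHexToSpaced ((s.drop a).take (b - a)) ++ [' ', '<', '-']
     else if !(pvHexToSpaced ((s.drop a).take (b - a))).isEmpty && !(pvHexToSpaced (s.drop b)).isEmpty then
       ['-', '>', ' '] ++ pvHexToSpaced ((s.drop a).take (b - a)) ++ [' ', '<', '-', ' '] ++ pvHexToSpaced (s.drop b)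
     else
       ['-', '>', ' '] ++ pvHexToSpaced ((s.drop a).take (b - a)) ++ [' ', '<', '-']) =
    PySem.Chars.join [' ']
      ((chunk2 s).take sa ++ [['-', '>']] ++
       (((chunk2 s).drop sa).take (sb - sa)) ++ [['<', '-']] ++
       (chunk2 s).drop sb) := by
  set before_spaced := pvHexToSpaced (s.take a) with hbsdef
  set marked_spaced := pvHexToSpaced ((s.drop a).take (b - a)) with hmsdef
  set after_spaced := pvHexToSpaced (s.drop b) with hasdef
  set T := chunk2 s with hTdef
  set X := T.take sa with hXdef
  set Y := (T.drop sa).take (sb - sa) with hYdef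
  set Z := T.drop sb with hZdef
  have hTlen : T.length = (s.length + 1) / 2 := length_chunk2 s
  have hXe : ∀ x ∈ X, x ≠ [] := fun x hx => chunk2_ne_nil s x (List.mem_of_mem_take hx)
  have hYe : ∀ x ∈ Y, x ≠ [] := fun x hx =>
    chunk2_ne_nil s x (List.mem_of_mem_drop (List.mem_of_mem_take hx))
  have hZe : ∀ x ∈ Z, x ≠ [] := fun x hx => chunk2_ne_nil s x (List.mem_of_mem_drop hx)
  have hbsX : before_spaced = PySem.Chars.join [' '] X := by
    rw [hbsdef]; unfold pvHexToSpaced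
    rw [tok_eq_chunk2, hXdef, hTdef, ha, chunk2_take]
  have hmsY : marked_spaced = PySem.Chars.join [' '] Y := by
    rcases hb with hbe | ⟨hbl, hsb⟩
    · rw [hmsdef]; unfold pvHexToSpaced
      rw [tok_eq_chunk2, hYdef, hTdef,
        show b - a = 2 * (sb - sa) by omega, chunk2_take, ha, chunk2_drop]
    · rw [hmsdef,
        show (s.drop a).take (b - a) = s.drop a from
          List.take_of_length_le (by simp; omega)]
      unfold pvHexToSpaced
      rw [tok_eq_chunk2, hYdef, hTdef, ha, chunk2_drop,
        show ((chunk2 s).drop sa).take (sb - sa) = (chunk2 s).drop sa from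
          List.take_of_length_le (by rw [List.length_drop, length_chunk2]; omega)]
  have hasZ : after_spaced = PySem.Chars.join [' '] Z := by
    rcases hb with hbe | ⟨hbl, hsb⟩
    · rw [hasdef]; unfold pvHexToSpaced
      rw [tok_eq_chunk2, hZdef, hTdef, show b = 2 * sb from hbe, chunk2_drop]
    · rw [hasdef, hbl, List.drop_length, hZdef, hTdef, hsb, ← length_chunk2 s,
        List.drop_length]
      unfold pvHexToSpaced
      rw [tok_eq_chunk2]
      simp [chunk2]
  have hYne : Y ≠ [] := by
    apply List.ne_nil_of_length_pos
    simp only [hYdef, List.length_take, List.length_drop, hTlen]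
    rcases hb with hbe | ⟨hbl, hsb⟩ <;> omega
  have hmsne : marked_spaced ≠ [] := by
    rw [hmsY, Ne, join_sp_eq_nil Y hYe]; exact hYne
  have hArg : X ++ [['-', '>']] ++ Y ++ [['<', '-']] ++ Z =
      X ++ (['-', '>'] :: (Y ++ (['<', '-'] :: Z))) := by simp
  have j2 : PySem.Chars.join [' '] (['-', '>'] :: (Y ++ (['<', '-'] :: Z))) =
      ['-', '>'] ++ [' '] ++ PySem.Chars.join [' '] (Y ++ (['<', '-'] :: Z)) :=
    join_cons' _ _ _ (by simp)
  have j3 : PySem.Chars.join [' '] (Y ++ (['<', '-'] :: Z)) =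
      PySem.Chars.join [' '] Y ++ [' '] ++ PySem.Chars.join [' '] (['<', '-'] :: Z) := by
    rw [join_append [' '] Y _ (by simp), if_neg hYne]
  rw [hArg, join_append [' '] X _ (by simp), j2, j3]
  by_cases hX : X = []
  · have hbse : before_spaced = [] := by rw [hbsX, hX, PySem.Chars.join_nil]
    rw [if_pos hX, if_neg (by simp [hbse]), if_neg (by simp [hbse])]
    by_cases hZ : Z = []
    · have hase : after_spaced = [] := by rw [hasZ, hZ, PySem.Chars.join_nil]
      rw [if_neg (by simp [hase]), hZ, PySem.Chars.join_singleton, hmsY]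
      simp
    · have hasne : after_spaced ≠ [] := by rw [hasZ, Ne, join_sp_eq_nil Z hZe]; exact hZ
      rw [if_pos (by simp [hmsne, hasne]), join_cons' _ _ _ hZ, hmsY, hasZ]
      simp
  · have hbsne : before_spaced ≠ [] := by rw [hbsX, Ne, join_sp_eq_nil X hXe]; exact hX
    rw [if_neg hX]
    by_cases hZ : Z = []
    · have hase : after_spaced = [] := by rw [hasZ, hZ, PySem.Chars.join_nil]
      rw [if_neg (by simp [hase]), if_pos (by simp [hmsne, hbsne]),
        hZ, PySem.Chars.join_singleton, hbsX, hmsY]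
      simp
    · have hasne : after_spaced ≠ [] := by rw [hasZ, Ne, join_sp_eq_nil Z hZe]; exact hZ
      rw [if_pos (by simp [hmsne, hasne, hbsne]),
        join_cons' _ _ _ hZ, hbsX, hmsY, hasZ]
      simp

theorem toList_eq_nil (hp : String) (h : hp.toList = []) : hp = "" := by
  have := congrArg String.ofList h
  simpa using this

-- ===== VERDICT =====
set_option maxHeartbeats 1600000 in
theorem add_markers_to_hex_pattern_spec : Claim_unchanged_add_markers_to_hex_pattern := by
  unfold Claim_unchanged_add_markers_to_hex_pattern
  intro hp mp hdom hpre
  unfold Spec_add_markers_to_hex_pattern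
  intro hnD
  unfold add_markers_to_hex_pattern add_markers_to_hex_pattern_alt
  by_cases hv : pvFromhexOk hp.toList = false
  · rw [if_pos hv, if_pos hv]
  · have hvT : pvFromhexOk hp.toList = true := by
      revert hv; cases pvFromhexOk hp.toList <;> simp
    have hP : ¬(mp < 0 ∨
        (hp.toList.length % 2 = 1 ∧ 8 < hp.toList.length ∧
          (hp.toList.length : Int) ≤ mp * 2)) := fun h => hpre ⟨hvT, h⟩
    have hmp : 0 ≤ mp := by by_contra h; exact hP (Or.inl (by omega))
    have hnotodd : ¬(hp.toList.length % 2 = 1 ∧ 8 < hp.toList.length ∧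
        (hp.toList.length : Int) ≤ mp * 2) := fun h => hP (Or.inr h)
    have hne : hp.toList ≠ [] := fun h => hnD (by unfold D_add_markers_to_hex_pattern; exact toList_eq_nil hp h)
    have hLpos : 0 < hp.toList.length := List.length_pos_iff.mpr hne
    rw [if_neg hv, if_neg hv]
    dsimp only
    rw [tok_eq_chunk2]
    have hTlen : (chunk2 hp.toList).length = (hp.toList.length + 1) / 2 := length_chunk2 _
    rw [hTlen]
    by_cases hc : mp * 2 ≥ ((hp.toList.length : Nat) : Int)
    · -- fallback branch: A marks the last 4 bytes; B's mp < n test is false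
      simp only [if_pos hc]
      rw [if_neg (show ¬ (mp < ((((hp.toList.length + 1) / 2 : Nat)) : Int)) by push_cast; omega)]
      have hms : max 0 ((hp.toList.length : Int) - 8) = ((hp.toList.length - 8 : Nat) : Int) := by
        omega
      have hst : max 0 (((((hp.toList.length + 1) / 2 : Nat)) : Int) - 4) =
          (((hp.toList.length + 1) / 2 - 4 : Nat) : Int) := by omega
      have hstp : min ((((hp.toList.length + 1) / 2 : Nat)) : Int)
            ((((hp.toList.length + 1) / 2 - 4 : Nat) : Int) + 4) =
          ((((hp.toList.length + 1) / 2 : Nat)) : Int) := by omega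
      have hcm := core_main hp.toList (hp.toList.length - 8) hp.toList.length
        ((hp.toList.length + 1) / 2 - 4) ((hp.toList.length + 1) / 2)
        (by omega) (Or.inr ⟨rfl, rfl⟩) (by omega) (le_refl _)
      rw [hms, hst, hstp,
        insert_insert (chunk2 hp.toList) ((hp.toList.length + 1) / 2 - 4)
          ((hp.toList.length + 1) / 2) (by omega) (by omega),
        PySem.List.slice_to_natCast, PySem.List.slice_natCast, PySem.List.slice_from_natCast,
        ← hcm]
      split_ifs <;> rfl
    · -- in-range branch
      simp only [if_neg hc]
      rw [if_pos (show mp < ((((hp.toList.length + 1) / 2 : Nat)) : Int) by push_cast; omega)]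
      obtain ⟨m, hm⟩ : ∃ m : Nat, mp = (m : Int) := ⟨mp.toNat, by omega⟩
      subst hm
      have ha : (m : Int) * 2 = ((2 * m : Nat) : Int) := by push_cast; ring
      have hbA : min ((hp.toList.length : Nat) : Int) (((2 * m : Nat) : Int) + 8) =
          ((min hp.toList.length (2 * m + 8) : Nat) : Int) := by push_cast; omega
      have hstp : min ((((hp.toList.length + 1) / 2 : Nat)) : Int) ((m : Int) + 4) =
          ((min ((hp.toList.length + 1) / 2) (m + 4) : Nat) : Int) := by push_cast; omega
      have hbor : min hp.toList.length (2 * m + 8) =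
            2 * min ((hp.toList.length + 1) / 2) (m + 4) ∨
          (min hp.toList.length (2 * m + 8) = hp.toList.length ∧
            min ((hp.toList.length + 1) / 2) (m + 4) = (hp.toList.length + 1) / 2) := by
        by_cases h8 : 2 * m + 8 ≤ hp.toList.length
        · left; omega
        · right; exact ⟨by omega, by omega⟩
      have hcm := core_main hp.toList (2 * m) (min hp.toList.length (2 * m + 8))
        m (min ((hp.toList.length + 1) / 2) (m + 4))
        rfl hbor (by omega) (by omega)
      rw [ha, hbA, hstp,
        insert_insert (chunk2 hp.toList) m (min ((hp.toList.length + 1) / 2) (m + 4))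
          (by omega) (by omega),
        PySem.List.slice_to_natCast, PySem.List.slice_natCast, PySem.List.slice_from_natCast,
        ← hcm]
      split_ifs <;> rfl

set_option maxHeartbeats 1600000 in
theorem add_markers_to_hex_pattern_tight : Claim_exact_add_markers_to_hex_pattern := by
  unfold Claim_exact_add_markers_to_hex_pattern
  intro hp mp hdom hpre hD
  unfold D_add_markers_to_hex_pattern at hD
  subst hD
  have hmp : 0 ≤ mp := by
    by_contra h
    exact hpre ⟨by decide, Or.inl (by omega)⟩
  unfold add_markers_to_hex_pattern add_markers_to_hex_pattern_alt
  rw [if_neg (show ¬(pvFromhexOk ("" : String).toList = false) by decide),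
      if_neg (show ¬(pvFromhexOk ("" : String).toList = false) by decide)]
  dsimp only
  have h0 : mp * 2 ≥ ((("" : String).toList.length : Nat) : Int) := by
    rw [show ((("" : String).toList.length : Nat) : Int) = 0 from by decide]; omega
  simp only [if_pos h0]
  rw [if_neg (show ¬ (mp < ((((PySem.List.pyRange 0 ((("" : String).toList.length : Nat) : Int) 2).map
          (fun i => PySem.List.slice ("" : String).toList (some i) (some (i + 2)))).length : Nat) : Int)) by
        rw [show ((((PySem.List.pyRange 0 ((("" : String).toList.length : Nat) : Int) 2).map
          (fun i => PySem.List.slice ("" : String).toList (some i) (some (i + 2)))).length : Nat) : Int) = 0 from by decide]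
        omega)]
  decide

theorem add_markers_to_hex_pattern_changed : Claim_changed_add_markers_to_hex_pattern := by
  unfold Claim_changed_add_markers_to_hex_pattern; decide
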